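-- pv_equiv track=rewrite | github.com/Rigooetto/publishing-contract | blueprints/streaming_royalties.py | _extract_individuals
-- ===== SOURCE A (Python) =====
-- def _extract_individuals(artist_name_csv_list):
--     """Split a list of collaboration CSV strings into a flat set of individual artist names."""
--     result = set()
--     for csv_str in artist_name_csv_list:
--         if csv_str:
--             for part in csv_str.split(','):
--                 part = part.strip()
--                 if part:
--                     result.add(part)
--     return result
-- ===== SOURCE B (Python) =====
-- def _extract_individuals(artist_name_csv_list):
--     """Single-pass character scanner: builds each trimmed name directly while
--     reading, instead of calling split()/strip() on substrings."""
--     result = set()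
--     for csv_str in artist_name_csv_list:
--         if csv_str:
--             token = []    # chars of the current name; leading whitespace never enters
--             pending = []  # whitespace seen after token chars; dropped if it turns out trailing
--             for ch in csv_str:
--                 if ch == ',':
--                     if token:
--                         result.add(''.join(token))
--                     token = []
--                     pending = []
--                 elif ch.isspace():
--                     if token:
--                         pending.append(ch)
--                 else:
--                     token.extend(pending)
--                     pending = []
--                     token.append(ch)
--             if token:
--                 result.add(''.join(token))
--     return result
-- ===== Notes on version B (the rewrite author's own statement) =====
-- stated objective: alternative
-- what changed: B replaces A's split-on-comma/strip/filter pipeline with a single-pass character-level state machine that builds each trimmed name directly (token buffer plus pending-whitespace buffer, flushed at commas and end of string), never calling split or strip.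
import Mathlib
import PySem

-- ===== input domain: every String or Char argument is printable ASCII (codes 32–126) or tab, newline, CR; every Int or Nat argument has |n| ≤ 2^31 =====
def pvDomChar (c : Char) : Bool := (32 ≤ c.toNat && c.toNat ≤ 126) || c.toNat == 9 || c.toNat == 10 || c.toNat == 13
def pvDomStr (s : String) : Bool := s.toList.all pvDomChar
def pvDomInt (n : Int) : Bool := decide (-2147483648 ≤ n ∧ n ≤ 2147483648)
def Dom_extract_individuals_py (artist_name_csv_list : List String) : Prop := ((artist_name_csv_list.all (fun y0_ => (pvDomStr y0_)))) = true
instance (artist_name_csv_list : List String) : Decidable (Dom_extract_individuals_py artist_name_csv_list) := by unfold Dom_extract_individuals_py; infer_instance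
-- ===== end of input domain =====

-- B replaces A's split/strip/filter pipeline by a single-pass character state machine
-- that builds each trimmed name directly (objective: alternative).

-- ===== PORT A =====
-- s.split(",") — the separator is the nonempty literal ",", so Python never raises;
-- exact via PySem.Chars.splitOn on the character list.
def pySplitComma (s : String) : List String :=
  (PySem.Chars.splitOn s.toList [',']).map String.ofList

def extract_individuals_py (artist_name_csv_list : List String) : List String :=
  artist_name_csv_list.foldl
    (fun result csv_str =>
      if csv_str ≠ "" then
        (pySplitComma csv_str).foldl
          (fun res part0 =>
            let part := PySem.Str.strip part0
            if part ≠ "" then PySem.Set.add res part else res)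
          result
      else result)
    PySem.Set.empty

-- ===== PORT B =====
-- the inner character loop of B: state = (token, pending whitespace, result set)
def scanStr : List Char → List Char → List Char → PySem.Set String → PySem.Set String
  | [], token, _pending, res =>
      if token ≠ [] then PySem.Set.add res (String.ofList token) else res
  | c :: l, token, pending, res =>
      if c = ',' then
        scanStr l [] []
          (if token ≠ [] then PySem.Set.add res (String.ofList token) else res)
      else if PySem.Chars.isspace c then
        scanStr l token (if token ≠ [] then pending ++ [c] else pending) res
      else
        scanStr l (token ++ pending ++ [c]) [] res

def extract_individuals_py_alt (artist_name_csv_list : List String) : List String :=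
  artist_name_csv_list.foldl
    (fun res csv_str =>
      if csv_str ≠ "" then scanStr csv_str.toList [] [] res else res)
    PySem.Set.empty

-- ===== PRECONDITION & SPEC =====
def Spec_extract_individuals_py (artist_name_csv_list : List String) (out : List String) : Prop := out = extract_individuals_py_alt artist_name_csv_list
instance (artist_name_csv_list : List String) (out : List String) : Decidable (Spec_extract_individuals_py artist_name_csv_list out) := by unfold Spec_extract_individuals_py; infer_instance

-- ===== CLAIM (what is proved, stated in full; the proofs are below) =====
def Claim_equal_extract_individuals_py : Prop := ∀ (artist_name_csv_list : List String), Dom_extract_individuals_py artist_name_csv_list → Spec_extract_individuals_py artist_name_csv_list (extract_individuals_py artist_name_csv_list)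

-- ===== LEMMAS AND PROOFS =====

-- Structural characterisation of Python's split on the single-character separator ','.
def splitC : List Char → List (List Char)
  | [] => [[]]
  | c :: rest =>
      if c = ',' then [] :: splitC rest
      else
        match splitC rest with
        | [] => [[c]]
        | h :: t => (c :: h) :: t

theorem splitC_ne_nil (l : List Char) : splitC l ≠ [] := by
  cases l with
  | nil => simp [splitC]
  | cons c rest =>
    simp only [splitC]
    split_ifs
    · simp
    · cases h : splitC rest <;> simp

-- prepend a prefix onto the first piece
def prep (p : List Char) : List (List Char) → List (List Char)
  | [] => [p]
  | h :: t => (p ++ h) :: t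

theorem splitOn_go_eq : ∀ (fuel : Nat) (l cur : List Char) (acc : List (List Char)),
    l.length ≤ fuel →
    PySem.Chars.splitOn.go [','] fuel l cur acc = acc.reverse ++ prep cur.reverse (splitC l) := by
  intro fuel
  induction fuel with
  | zero =>
    intro l cur acc h
    have : l = [] := by cases l <;> simp_all
    subst this
    simp [PySem.Chars.splitOn.go, splitC, prep]
  | succ f ih =>
    intro l cur acc h
    cases l with
    | nil => simp [PySem.Chars.splitOn.go, splitC, prep]
    | cons c rest =>
      by_cases hc : c = ','
      · subst hc
        have hpre : [','].isPrefixOf (',' :: rest) = true := by simp [List.isPrefixOf]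
        rw [show PySem.Chars.splitOn.go [','] (f+1) (',' :: rest) cur acc
              = PySem.Chars.splitOn.go [','] f rest [] (cur.reverse :: acc) by
            simp [PySem.Chars.splitOn.go, hpre]]
        rw [ih rest [] (cur.reverse :: acc) (by simpa using Nat.le_of_succ_le_succ h)]
        obtain ⟨hh, tt, hst⟩ : ∃ hh tt, splitC rest = hh :: tt := by
          cases hs : splitC rest with
          | nil => exact absurd hs (splitC_ne_nil rest)
          | cons a b => exact ⟨a, b, rfl⟩
        simp [splitC, hst, prep]
      · have hpre : [','].isPrefixOf (c :: rest) = false := by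
          simp [List.isPrefixOf]; exact fun hcc => (hc hcc.symm).elim
        rw [show PySem.Chars.splitOn.go [','] (f+1) (c :: rest) cur acc
              = PySem.Chars.splitOn.go [','] f rest (c :: cur) acc by
            simp [PySem.Chars.splitOn.go, hpre]]
        rw [ih rest (c :: cur) acc (by simpa using Nat.le_of_succ_le_succ h)]
        obtain ⟨hh, tt, hst⟩ : ∃ hh tt, splitC rest = hh :: tt := by
          cases hs : splitC rest with
          | nil => exact absurd hs (splitC_ne_nil rest)
          | cons a b => exact ⟨a, b, rfl⟩
        simp [splitC, hst, prep, hc]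

theorem splitOn_eq_splitC (l : List Char) :
    PySem.Chars.splitOn l [','] = splitC l := by
  rw [show PySem.Chars.splitOn l [','] = PySem.Chars.splitOn.go [','] (l.length + 1) l [] [] from rfl]
  rw [splitOn_go_eq (l.length + 1) l [] [] (by omega)]
  obtain ⟨hh, tt, hst⟩ : ∃ hh tt, splitC l = hh :: tt := by
    cases hs : splitC l with
    | nil => exact absurd hs (splitC_ne_nil l)
    | cons a b => exact ⟨a, b, rfl⟩
  simp [hst, prep]

-- add the stripped token if nonempty
def addTok (res : PySem.Set String) (tok : List Char) : PySem.Set String :=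
  if tok ≠ [] then PySem.Set.add res (String.ofList tok) else res

def stepA (res : PySem.Set String) (piece : List Char) : PySem.Set String :=
  addTok res (PySem.Chars.strip piece)

-- stripping leaves a token with non-space first and last characters unchanged
theorem strip_inv (t p : List Char)
    (hp : ∀ c ∈ p, PySem.Chars.isspace c = true)
    (htp : t = [] → p = [])
    (hhd : ∀ c ts, t = c :: ts → PySem.Chars.isspace c = false)
    (hlast : ∀ c ts, t.reverse = c :: ts → PySem.Chars.isspace c = false) :
    PySem.Chars.strip (t ++ p) = t := by
  cases ht : t with
  | nil =>
    subst ht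
    simp [htp rfl, PySem.Chars.strip, PySem.Chars.lstrip, PySem.Chars.rstrip]
  | cons c ts =>
    have hc := hhd c ts ht
    subst ht
    unfold PySem.Chars.strip PySem.Chars.lstrip PySem.Chars.rstrip
    rw [List.cons_append, List.dropWhile_cons_of_neg (by simp [hc]), ← List.cons_append,
        List.reverse_append]
    have hpdrop : List.dropWhile PySem.Chars.isspace p.reverse = [] := by
      rw [List.dropWhile_eq_nil_iff]
      intro x hx
      exact hp x (by simpa using hx)
    rw [List.dropWhile_append, hpdrop]
    simp only [List.isEmpty_nil, if_true]
    cases hr : (c :: ts).reverse with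
    | nil => simp at hr
    | cons c' ts' =>
      have hc' := hlast c' ts' hr
      rw [List.dropWhile_cons_of_neg (by simp [hc'])]
      rw [← hr, List.reverse_reverse]

-- the machine computes exactly strip-and-collect over the comma pieces
theorem scan_eq : ∀ (l t p : List Char) (res : PySem.Set String),
    (∀ c ∈ p, PySem.Chars.isspace c = true) →
    (t = [] → p = []) →
    (∀ c ts, t = c :: ts → PySem.Chars.isspace c = false) →
    (∀ c ts, t.reverse = c :: ts → PySem.Chars.isspace c = false) →
    scanStr l t p res =
      (match splitC l with
       | [] => res
       | h :: rest => rest.foldl stepA (addTok res (PySem.Chars.strip (t ++ p ++ h)))) := by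
  intro l
  induction l with
  | nil =>
    intro t p res hp htp hhd hlast
    simp only [splitC, scanStr]
    rw [show t ++ p ++ ([] : List Char) = t ++ p by simp]
    rw [strip_inv t p hp htp hhd hlast]
    simp [addTok, List.foldl]
  | cons c l ih =>
    intro t p res hp htp hhd hlast
    obtain ⟨h0, rest, hs⟩ : ∃ h0 rest, splitC l = h0 :: rest := by
      cases hsx : splitC l with
      | nil => exact absurd hsx (splitC_ne_nil l)
      | cons a b => exact ⟨a, b, rfl⟩
    by_cases hc : c = ','
    · subst hc
      have hsp : splitC (',' :: l) = [] :: h0 :: rest := by simp [splitC, hs]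
      rw [show scanStr (',' :: l) t p res
            = scanStr l [] [] (if t ≠ [] then PySem.Set.add res (String.ofList t) else res)
          from by simp [scanStr]]
      rw [ih [] [] _ (by simp) (by simp) (by simp) (by simp)]
      rw [hs, hsp]
      simp only [List.nil_append, List.foldl_cons, List.append_nil]
      rw [strip_inv t p hp htp hhd hlast]
      rfl
    · have hsp : splitC (c :: l) = (c :: h0) :: rest := by
        simp [splitC, hc, hs]
      by_cases hw : PySem.Chars.isspace c = true
      · cases ht : t with
        | nil =>
          subst ht
          have hpe : p = [] := htp rfl
          subst hpe
          rw [show scanStr (c :: l) [] [] res = scanStr l [] [] res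
              from by simp [scanStr, hc, hw]]
          rw [ih [] [] res (by simp) (by simp) (by simp) (by simp)]
          rw [hs, hsp]
          simp only [List.nil_append]
          congr 2
          unfold PySem.Chars.strip PySem.Chars.lstrip
          rw [List.dropWhile_cons_of_pos hw]
        | cons a ts =>
          rw [← ht]
          have htne : t ≠ [] := by rw [ht]; simp
          rw [show scanStr (c :: l) t p res = scanStr l t (p ++ [c]) res
              from by simp [scanStr, hc, hw, ht]]
          rw [ih t (p ++ [c]) res
                (by intro x hx; rcases List.mem_append.mp hx with h | h
                    · exact hp x h
                    · simp at h; subst h; exact hw)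
                (fun h => absurd h htne) hhd hlast]
          rw [hs, hsp]
          simp
      · -- non-space, non-comma character
        simp only [scanStr, if_neg hc, if_neg hw]
        have hb : PySem.Chars.isspace c = false := by
          cases h : PySem.Chars.isspace c
          · rfl
          · exact absurd h hw
        rw [ih (t ++ p ++ [c]) [] res (by simp) (by simp)
              (by intro x xs hx
                  cases ht : t with
                  | nil => subst ht; rw [htp rfl] at hx; simp at hx
                           rw [← hx.1]; exact hb
                  | cons a as =>
                      rw [ht] at hx
                      simp only [List.cons_append, List.cons.injEq] at hx
                      rw [← hx.1]; exact hhd a as ht)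
              (by intro x xs hx
                  simp only [List.reverse_append, List.reverse_cons, List.reverse_nil,
                    List.nil_append, List.cons_append, List.cons.injEq] at hx
                  rw [← hx.1]; exact hb)]
        rw [hs, hsp]
        simp

-- A's inner fold over the pieces, rewritten through stepA
theorem A_inner (s : String) (res : PySem.Set String) :
    (pySplitComma s).foldl
      (fun r part0 =>
        let part := PySem.Str.strip part0
        if part ≠ "" then PySem.Set.add r part else r)
      res
    = (splitC s.toList).foldl stepA res := by
  unfold pySplitComma
  rw [splitOn_eq_splitC, List.foldl_map]
  congr 1
  funext r piece
  simp only [stepA, addTok, PySem.Str.strip]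
  rw [String.toList_ofList]
  by_cases h : PySem.Chars.strip piece = []
  · simp [h]
  · have : String.ofList (PySem.Chars.strip piece) ≠ "" := by
      intro hh
      apply h
      have := congrArg String.toList hh
      simpa [String.toList_ofList] using this
    simp [h, this]

-- per string: B's machine = A's split/strip/filter fold
theorem per_string (s : String) (res : PySem.Set String) :
    scanStr s.toList [] [] res = (splitC s.toList).foldl stepA res := by
  rw [scan_eq s.toList [] [] res (by simp) (by simp) (by simp) (by simp)]
  obtain ⟨h0, rest, hs⟩ : ∃ h0 rest, splitC s.toList = h0 :: rest := by
    cases hsx : splitC s.toList with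
    | nil => exact absurd hsx (splitC_ne_nil _)
    | cons a b => exact ⟨a, b, rfl⟩
  rw [hs]
  simp only [List.nil_append, List.foldl_cons]
  rfl

-- ===== VERDICT (by name: the statement is the Claim_ definition above) =====
theorem extract_individuals_py_spec : Claim_equal_extract_individuals_py := by
  intro l _
  unfold Spec_extract_individuals_py
  unfold extract_individuals_py extract_individuals_py_alt
  congr 1
  funext res s
  by_cases h : s = ""
  · simp [h]
  · simp only [ne_eq, h, not_false_eq_true, ite_true]
    rw [per_string, A_inner]
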